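-- pv_equiv track=rewrite | github.com/Yiwan233/2025- | Q2/main1.py | _can_explain_alleles
-- ===== SOURCE A (Python) =====
-- from typing import Dict, List, Tuple, Optional, Any, Union
--
-- def _can_explain_alleles(genotype_set: List[Tuple[str, str]],
--                        observed_alleles: List[str]) -> bool:
--     """
--     检查基因型组合是否能解释所有观测到的等位基因
--     （允许ADO，即基因型中的等位基因可以不在观测中出现）
--     """
--     # 从基因型组合中收集所有等位基因
--     genotype_alleles = set()
--     for genotype in genotype_set:
--         if genotype is not None:
--             genotype_alleles.update(genotype)
--
--     # 检查所有观测等位基因是否都能被基因型组合解释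
--     observed_set = set(observed_alleles)
--     return observed_set.issubset(genotype_alleles)
-- ===== SOURCE B (Python) =====
-- from typing import Dict, List, Tuple, Optional, Any, Union
--
-- def _can_explain_alleles(genotype_set: List[Tuple[str, str]],
--                        observed_alleles: List[str]) -> bool:
--     # per-allele nested scan: no intermediate union set is built
--     return all(any(a in g for g in genotype_set if g is not None)
--                for a in observed_alleles)
-- ===== Notes on version B (the rewrite author's own statement) =====
-- stated objective: simpler
-- what changed: Replaces the union-set accumulation plus subset test by a direct nested scan: for each observed allele, check membership in some genotype tuple; no intermediate set is maintained.
import Mathlib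
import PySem

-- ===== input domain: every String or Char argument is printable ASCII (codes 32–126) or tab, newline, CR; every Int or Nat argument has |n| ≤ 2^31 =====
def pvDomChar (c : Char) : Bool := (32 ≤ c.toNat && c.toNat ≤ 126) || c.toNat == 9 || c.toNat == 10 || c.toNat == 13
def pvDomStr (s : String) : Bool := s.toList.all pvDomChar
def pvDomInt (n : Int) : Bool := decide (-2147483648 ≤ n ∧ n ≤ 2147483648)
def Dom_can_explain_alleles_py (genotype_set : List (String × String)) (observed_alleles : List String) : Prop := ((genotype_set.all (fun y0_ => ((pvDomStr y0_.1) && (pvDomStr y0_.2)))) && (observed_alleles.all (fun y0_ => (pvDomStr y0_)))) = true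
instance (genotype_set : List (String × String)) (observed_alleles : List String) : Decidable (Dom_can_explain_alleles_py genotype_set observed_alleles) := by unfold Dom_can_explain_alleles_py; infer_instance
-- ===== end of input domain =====

-- ===== PORT A =====
-- Header: B checks each observed allele against the genotypes directly (no union set); objective: simpler.
def can_explain_alleles_py (genotype_set : List (String × String)) (observed_alleles : List String) : Bool :=
  let genotype_alleles :=
    genotype_set.foldl (fun s g => PySem.Set.update s [g.1, g.2]) PySem.Set.empty
  let observed_set := PySem.Set.ofList observed_alleles
  PySem.Set.issubset observed_set genotype_alleles

-- ===== PORT B =====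
def can_explain_alleles_py_alt (genotype_set : List (String × String)) (observed_alleles : List String) : Bool :=
  observed_alleles.all (fun a => genotype_set.any (fun g => a == g.1 || a == g.2))

-- ===== PRECONDITION & SPEC =====
def Spec_can_explain_alleles_py (genotype_set : List (String × String)) (observed_alleles : List String) (out : Bool) : Prop := out = can_explain_alleles_py_alt genotype_set observed_alleles
instance (genotype_set : List (String × String)) (observed_alleles : List String) (out : Bool) : Decidable (Spec_can_explain_alleles_py genotype_set observed_alleles out) := by unfold Spec_can_explain_alleles_py; infer_instance

-- ===== CLAIM (what is proved, stated in full; the proofs are below) =====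
def Claim_equal_can_explain_alleles_py : Prop := ∀ (genotype_set : List (String × String)) (observed_alleles : List String), Dom_can_explain_alleles_py genotype_set observed_alleles → Spec_can_explain_alleles_py genotype_set observed_alleles (can_explain_alleles_py genotype_set observed_alleles)

-- ===== LEMMAS AND PROOFS =====
theorem pv_mem_foldl_update {x : String} (gs : List (String × String)) (s : PySem.Set String) :
    x ∈ gs.foldl (fun s g => PySem.Set.update s [g.1, g.2]) s ↔
      x ∈ s ∨ ∃ g ∈ gs, x = g.1 ∨ x = g.2 := by
  induction gs generalizing s with
  | nil => simp
  | cons g gs ih =>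
    rw [List.foldl_cons, ih, PySem.Set.mem_update]
    constructor
    · rintro ((h | h) | ⟨g', hg', h⟩)
      · exact .inl h
      · exact .inr ⟨g, List.mem_cons_self, by simpa using h⟩
      · exact .inr ⟨g', List.mem_cons_of_mem _ hg', h⟩
    · rintro (h | ⟨g', hg', h⟩)
      · exact .inl (.inl h)
      · rcases List.mem_cons.mp hg' with rfl | hg'
        · exact .inl (.inr (by simpa using h))
        · exact .inr ⟨g', hg', h⟩

theorem can_explain_alleles_py_spec : Claim_equal_can_explain_alleles_py := by
  intro gs obs _
  unfold Spec_can_explain_alleles_py can_explain_alleles_py can_explain_alleles_py_alt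
  rw [Bool.eq_iff_iff, PySem.Set.issubset_iff, List.all_eq_true]
  simp only [List.any_eq_true]
  constructor
  · intro h a ha
    have := h a (by simp [PySem.Set.mem_ofList, ha])
    rw [pv_mem_foldl_update] at this
    rcases this with h | ⟨g, hg, h⟩
    · simp [PySem.Set.empty] at h
    · exact ⟨g, hg, by rcases h with h | h <;> simp [h]⟩
  · intro h a ha
    rw [PySem.Set.mem_ofList] at ha
    obtain ⟨g, hg, hm⟩ := h a ha
    rw [pv_mem_foldl_update]
    right; exact ⟨g, hg, by rcases Bool.or_eq_true_iff.mp hm with h | h <;> [left; right] <;> exact (beq_iff_eq.mp h)⟩
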